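-- pv_equiv track=rewrite | github.com/Servando1990/personal-pipeline | src/data/json_processing.py | _get_telephonehistory_features
-- ===== SOURCE A (Python) =====
-- from typing import Dict, List
--
-- def _get_telephonehistory_features(df_row: List[dict]) -> Dict[str, bool]:
--     # FIXME df_row should be a List[Dict]
--     hometel_nums = [d["hometelephonenumber"] for d in df_row]
--     mobiletel_nums = [d["mobiletelephonenumber"] for d in df_row]
--     change_homenumber = True if len(set(hometel_nums)) > 1 else False
--     change_mobile = True if len(set(mobiletel_nums)) > 1 else False
--
--     feature_dict = {
--         "change_homenumber": change_homenumber,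
--         "change_mobile": change_mobile,
--     }
--
--     return feature_dict
-- ===== SOURCE B (Python) =====
-- from typing import Dict, List
--
--
-- def _column_changed(df_row, key):
--     # One pass: remember the first value seen; flag once any later value differs.
--     seen = False
--     first = None
--     changed = False
--     for d in df_row:
--         v = d[key]
--         if not seen:
--             first = v
--             seen = True
--         elif v != first:
--             changed = True
--     return changed
--
--
-- def _get_telephonehistory_features(df_row: List[dict]) -> Dict[str, bool]:
--     change_homenumber = _column_changed(df_row, "hometelephonenumber")
--     change_mobile = _column_changed(df_row, "mobiletelephonenumber")
--     return {
--         "change_homenumber": change_homenumber,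
--         "change_mobile": change_mobile,
--     }
-- ===== Notes on version B (the rewrite author's own statement) =====
-- stated objective: simpler
-- what changed: Replaces building full value lists and materialising sets (len(set(...))>1) with a shared one-pass helper per column that keeps the first value seen and a changed flag, allocating nothing.
import Mathlib
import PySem

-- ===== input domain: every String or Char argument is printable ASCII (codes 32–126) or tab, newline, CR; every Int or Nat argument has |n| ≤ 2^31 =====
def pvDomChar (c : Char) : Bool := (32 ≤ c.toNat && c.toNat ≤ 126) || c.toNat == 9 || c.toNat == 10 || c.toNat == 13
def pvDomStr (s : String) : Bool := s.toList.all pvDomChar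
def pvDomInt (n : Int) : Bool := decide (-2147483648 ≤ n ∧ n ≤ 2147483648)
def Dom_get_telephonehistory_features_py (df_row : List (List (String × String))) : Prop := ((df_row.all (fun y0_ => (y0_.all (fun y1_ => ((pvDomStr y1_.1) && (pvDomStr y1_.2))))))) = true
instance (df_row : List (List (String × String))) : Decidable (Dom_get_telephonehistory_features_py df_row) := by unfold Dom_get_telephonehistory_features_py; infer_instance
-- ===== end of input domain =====

-- B replaces the two list comprehensions + len(set(...))>1 tests by a shared one-pass
-- helper per column (first value seen + changed flag); objective: simpler, no allocation.

-- ===== PORT A =====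
-- d[k]: first-match lookup; none = KeyError, excluded by Pre_ (getD "" is never reached inside Pre_)
def pvLookup (d : List (String × String)) (k : String) : String :=
  ((PySem.Dict.mk d).get? k).getD ""

def get_telephonehistory_features_py (df_row : List (List (String × String))) : List (String × Bool) :=
  let hometel_nums := df_row.map (fun d => pvLookup d "hometelephonenumber")
  let mobiletel_nums := df_row.map (fun d => pvLookup d "mobiletelephonenumber")
  let change_homenumber := if 1 < (PySem.Set.ofList hometel_nums).length then true else false
  let change_mobile := if 1 < (PySem.Set.ofList mobiletel_nums).length then true else false
  [("change_homenumber", change_homenumber), ("change_mobile", change_mobile)]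

-- ===== PORT B =====
-- one step of _column_changed's loop: state = (first value seen (none before any), changed flag)
def pvColStep (k : String) (st : Option String × Bool) (d : List (String × String)) :
    Option String × Bool :=
  let v := pvLookup d k
  match st.1 with
  | none => (some v, st.2)
  | some f => (some f, st.2 || (v != f))

def pvColumnChanged (df_row : List (List (String × String))) (k : String) : Bool :=
  (df_row.foldl (pvColStep k) (none, false)).2

def get_telephonehistory_features_py_alt (df_row : List (List (String × String))) : List (String × Bool) :=
  let change_homenumber := pvColumnChanged df_row "hometelephonenumber"
  let change_mobile := pvColumnChanged df_row "mobiletelephonenumber"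
  [("change_homenumber", change_homenumber), ("change_mobile", change_mobile)]

-- ===== PRECONDITION & SPEC =====
-- Pre_: every record has both telephone keys; on any other input Python A raises KeyError.
def Pre_get_telephonehistory_features_py (df_row : List (List (String × String))) : Prop :=
  (df_row.all (fun d => (PySem.Dict.mk d).contains "hometelephonenumber" &&
                        (PySem.Dict.mk d).contains "mobiletelephonenumber")) = true
instance (df_row : List (List (String × String))) : Decidable (Pre_get_telephonehistory_features_py df_row) := by unfold Pre_get_telephonehistory_features_py; infer_instance

def pvWitness_get_telephonehistory_features_py : (List (List (String × String))) :=
  [[("hometelephonenumber", "111"), ("mobiletelephonenumber", "222")],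
   [("hometelephonenumber", "111"), ("mobiletelephonenumber", "333")]]

def Spec_get_telephonehistory_features_py (df_row : List (List (String × String))) (out : List (String × Bool)) : Prop := out = get_telephonehistory_features_py_alt df_row
instance (df_row : List (List (String × String))) (out : List (String × Bool)) : Decidable (Spec_get_telephonehistory_features_py df_row out) := by unfold Spec_get_telephonehistory_features_py; infer_instance

-- ===== CLAIM (what is proved, stated in full; the proofs are below) =====
def Claim_equal_get_telephonehistory_features_py : Prop := ∀ (df_row : List (List (String × String))), Dom_get_telephonehistory_features_py df_row → Pre_get_telephonehistory_features_py df_row → Spec_get_telephonehistory_features_py df_row (get_telephonehistory_features_py df_row)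

-- ===== LEMMAS AND PROOFS =====

-- B's loop after the first element: the flag accumulates "some later value differs from f".
theorem pvColStep_foldl (k : String) (f : String) (b : Bool)
    (rest : List (List (String × String))) :
    (rest.foldl (pvColStep k) (some f, b)).2
      = (b || rest.any (fun d => pvLookup d k != f)) := by
  induction rest generalizing b with
  | nil => simp
  | cons d rest ih =>
      simp only [List.foldl_cons, List.any_cons, pvColStep]
      rw [ih]
      cases b <;> simp

-- A's set test on a nonempty column equals "some later value differs from the first".
theorem set_gt_one_iff (f : String) (rest : List String) :
    (if 1 < (PySem.Set.ofList (f :: rest)).length then true else false)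
      = rest.any (fun v => v != f) := by
  rw [PySem.Set.ofList_cons]
  by_cases h : ∃ v ∈ rest, v ≠ f
  · have hne : PySem.Set.discard (PySem.Set.ofList rest) f ≠ [] := by
      obtain ⟨v, hv, hvf⟩ := h
      intro hnil
      have : v ∈ PySem.Set.discard (PySem.Set.ofList rest) f := by
        rw [PySem.Set.mem_discard]
        exact ⟨(PySem.Set.mem_ofList _ _).mpr hv, hvf⟩
      simp [hnil] at this
    have hlen : 0 < (PySem.Set.discard (PySem.Set.ofList rest) f).length :=
      List.length_pos_iff.mpr hne
    have hany : rest.any (fun v => v != f) = true := by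
      obtain ⟨v, hv, hvf⟩ := h
      exact List.any_eq_true.mpr ⟨v, hv, by simpa using hvf⟩
    simp [hany, List.length_cons]
    omega
  · push Not at h
    have hnil : PySem.Set.discard (PySem.Set.ofList rest) f = [] := by
      by_contra hne
      obtain ⟨v, hv⟩ := List.exists_mem_of_ne_nil _ hne
      rw [PySem.Set.mem_discard, PySem.Set.mem_ofList] at hv
      exact hv.2 (h v hv.1)
    have hany : rest.any (fun v => v != f) = false := by
      rw [List.any_eq_false]; intro v hv; simpa using h v hv
    simp [hnil, hany]

-- per-column agreement
theorem column_agree (df_row : List (List (String × String))) (k : String) :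
    (if 1 < (PySem.Set.ofList (df_row.map (fun d => pvLookup d k))).length then true else false)
      = pvColumnChanged df_row k := by
  cases df_row with
  | nil => simp [pvColumnChanged]
  | cons d rest =>
      unfold pvColumnChanged
      simp only [List.foldl_cons, pvColStep]
      rw [pvColStep_foldl, List.map_cons, set_gt_one_iff]
      simp [List.any_map, Function.comp_def]

-- ===== VERDICT (by name: the statement is the Claim_ definition above) =====
theorem get_telephonehistory_features_py_spec : Claim_equal_get_telephonehistory_features_py := by
  intro df_row _ _
  unfold Spec_get_telephonehistory_features_py
  simp only [get_telephonehistory_features_py, get_telephonehistory_features_py_alt,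
    column_agree]
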